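-- pv_equiv track=rewrite | github.com/wendyzheng0/dailyleetcode | 2510_isThereAPath.py | isThereAPath
-- ===== SOURCE A (Python) =====
-- from typing import List
--
-- def isThereAPath(grid: List[List[int]]) -> bool:
--     m, n = len(grid), len(grid[0])
--     pathlen = m + n - 1
--     if pathlen & 1 != 0:
--         return False
--     onecnt = pathlen >> 1
--     # for every grid in a line, the possible ones on the path
--     dp = [0] * n
--     dp[0] = 1 # at first, there is no 1 in the path
--     for i in range(m):
--         for j in range(n):
--             if j > 0:
--                 # ones from [0, 0] to [i, j] are those from [i - 1, j] and [i, j - 1]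
--                 dp[j] |= dp[j - 1]
--             if grid[i][j]:
--                 # every path adds one more
--                 dp[j] = dp[j] << 1
--     # check whether there are path has onecnt 1 when in [n-1, n-1]
--     return dp[-1] & (1 << onecnt) != 0
-- ===== SOURCE B (Python) =====
-- from typing import List
--
-- def isThereAPath(grid: List[List[int]]) -> bool:
--     m, n = len(grid), len(grid[0])
--     if (m + n - 1) % 2 == 1:
--         return False
--     target = (m + n - 1) // 2
--     # (min, max) of achievable ones-counts per cell of the current row; the set of
--     # achievable counts at each cell is a contiguous interval, so the pair suffices.
--     iv = []
--     acc = 0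
--     for g in grid[0]:
--         acc += 1 if g else 0
--         iv.append((acc, acc))
--     for row in grid[1:]:
--         prev = None
--         niv = []
--         for (up, g) in zip(iv, row):
--             b = 1 if g else 0
--             lo, hi = up
--             if prev is not None:
--                 lo = min(lo, prev[0])
--                 hi = max(hi, prev[1])
--             prev = (lo + b, hi + b)
--             niv.append(prev)
--         iv = niv
--     lo, hi = iv[-1]
--     return lo <= target <= hi
-- ===== Notes on version B (the rewrite author's own statement) =====
-- stated objective: alternative
-- what changed: A keeps, per cell, a big-integer bitset of all achievable ones-counts along monotone paths (|= and << on (m+n)-bit ints); B keeps only the (min,max) interval of achievable counts per cell - provably equivalent since the achievable counts form a contiguous interval - using plain integer arithmetic per cell.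
import Mathlib
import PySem

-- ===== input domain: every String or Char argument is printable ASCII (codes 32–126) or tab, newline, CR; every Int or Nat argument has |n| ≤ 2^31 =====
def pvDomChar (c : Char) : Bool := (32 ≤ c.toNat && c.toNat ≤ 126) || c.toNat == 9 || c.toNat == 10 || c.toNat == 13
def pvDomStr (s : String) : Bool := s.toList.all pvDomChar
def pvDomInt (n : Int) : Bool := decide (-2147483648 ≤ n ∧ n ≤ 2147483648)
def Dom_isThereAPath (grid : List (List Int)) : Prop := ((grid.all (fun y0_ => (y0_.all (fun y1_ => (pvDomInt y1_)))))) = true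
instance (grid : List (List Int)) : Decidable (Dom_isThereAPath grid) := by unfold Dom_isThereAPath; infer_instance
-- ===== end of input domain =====

-- B replaces A's per-cell bitset of achievable ones-counts (a big integer) by the (min, max)
-- interval of achievable counts, which is equivalent because the achievable counts at each
-- cell form a contiguous interval; objective: alternative.

-- ===== PORT A =====

-- A's 'if grid[i][j]: dp[j] = dp[j] << 1'
def pvStepA (g d : Int) : Int := if g ≠ 0 then d <<< (1 : Nat) else d

-- A's inner loop for columns j ≥ 1: 'left' is dp[j-1] as just rewritten, the first list the
-- remaining tail of dp (previous-row values), the second the remaining tail of grid[i]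
def pvRowA : Int → List Int → List Int → List Int
  | _, [], _ => []
  | _, _ :: _, [] => []        -- grid row shorter than dp: Python raises IndexError; outside Pre_
  | left, d :: ds, g :: gs =>
      let d' := pvStepA g (PySem.Int.bor d left)
      d' :: pvRowA d' ds gs

-- one iteration of A's outer loop; j = 0 takes no OR (Python's 'if j > 0')
def pvRowAFull (dp row : List Int) : List Int :=
  match dp, row with
  | d :: ds, g :: gs => let d' := pvStepA g d; d' :: pvRowA d' ds gs
  | _, _ => dp

def isThereAPath (grid : List (List Int)) : Bool :=
  let m := grid.length
  let n := (grid.headD []).length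
  let pathlen := m + n - 1      -- Nat subtraction: exact, since Pre_ gives grid ≠ [] (m ≥ 1)
  if pathlen &&& 1 ≠ 0 then false
  else
    let onecnt := pathlen >>> 1
    let dp0 : List Int := 1 :: List.replicate (n - 1) 0   -- dp = [0]*n; dp[0] = 1 (n ≥ 1 inside Pre_)
    let dp := grid.foldl pvRowAFull dp0
    decide (PySem.Int.band ((dp.getLast?).getD 0) ((1 : Int) <<< onecnt) ≠ 0)

-- ===== PORT B =====

-- '1 if g else 0'
def pvB (g : Int) : Int := if g ≠ 0 then 1 else 0

-- B's inner loop for columns j ≥ 1: 'prev' is the interval just computed to the left, the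
-- pair list the previous row's intervals, the Int list the grid row ('zip' truncates)
def pvRowB : Int × Int → List (Int × Int) → List Int → List (Int × Int)
  | _, [], _ => []
  | _, _ :: _, [] => []
  | prev, (lo, hi) :: ivs, g :: gs =>
      let cur := (min lo prev.1 + pvB g, max hi prev.2 + pvB g)
      cur :: pvRowB cur ivs gs

-- one iteration of B's row loop; the first cell has no left neighbour ('prev is None')
def pvRowBFull (iv : List (Int × Int)) (row : List Int) : List (Int × Int) :=
  match iv, row with
  | (lo, hi) :: ivs, g :: gs => let cur := (lo + pvB g, hi + pvB g); cur :: pvRowB cur ivs gs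
  | _, _ => iv

-- B's first loop: running ones-count acc over grid[0], intervals (acc, acc)
def pvFirstRow : Int → List Int → List (Int × Int)
  | _, [] => []
  | acc, g :: gs => let a := acc + pvB g; (a, a) :: pvFirstRow a gs

def isThereAPath_alt (grid : List (List Int)) : Bool :=
  let m := grid.length
  let n := (grid.headD []).length
  if (m + n - 1) % 2 = 1 then false
  else
    let target : Int := (((m + n - 1) / 2 : Nat) : Int)
    let iv := (grid.drop 1).foldl pvRowBFull (pvFirstRow 0 (grid.headD []))
    match iv.getLast? with
    | some (lo, hi) => decide (lo ≤ target ∧ target ≤ hi)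
    | none => false                                       -- iv[-1] would raise; outside Pre_

-- ===== PRECONDITION & SPEC =====
-- Pre_ is exactly where A returns: grid nonempty (else 'grid[0]' raises IndexError), and — unless
-- the path length is odd, where A returns False before touching dp — grid[0] nonempty (else
-- 'dp[0] = 1' raises) and every row at least as long as grid[0] (else 'grid[i][j]' raises).
def Pre_isThereAPath (grid : List (List Int)) : Prop :=
  grid ≠ [] ∧
    ((grid.length + (grid.headD []).length - 1) % 2 = 1 ∨
      (1 ≤ (grid.headD []).length ∧ ∀ row ∈ grid, (grid.headD []).length ≤ row.length))
instance (grid : List (List Int)) : Decidable (Pre_isThereAPath grid) := by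
  unfold Pre_isThereAPath; infer_instance

def pvWitness_isThereAPath : List (List Int) := [[1, 0, 0], [0, 0, 1]]

def Spec_isThereAPath (grid : List (List Int)) (out : Bool) : Prop := out = isThereAPath_alt grid
instance (grid : List (List Int)) (out : Bool) : Decidable (Spec_isThereAPath grid out) := by
  unfold Spec_isThereAPath; infer_instance

-- ===== CLAIM (what is proved, stated in full; the proofs are below) =====
def Claim_equal_isThereAPath : Prop := ∀ (grid : List (List Int)), Dom_isThereAPath grid → Pre_isThereAPath grid → Spec_isThereAPath grid (isThereAPath grid)

-- ===== LEMMAS AND PROOFS =====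

-- bits a .. b (inclusive) set: A's dp entries are sums of such runs
def pvMask (a b : ℕ) : ℕ := 2 ^ (b + 1) - 2 ^ a

-- A's dp entry d and B's interval p describe the same cell
def pvInv (d : Int) (p : Int × Int) : Prop :=
  ∃ a b : ℕ, a ≤ b ∧ p.1 = (a : Int) ∧ p.2 = (b : Int) ∧ d = ((pvMask a b : ℕ) : Int)

-- relation between horizontally adjacent intervals of one row
def pvRel (u v : Int × Int) : Prop := v.1 ≤ u.2 + 1 ∧ u.1 ≤ v.2

theorem pvMask_eq_shift (a b : ℕ) (h : a ≤ b + 1) : pvMask a b = (2 ^ (b + 1 - a) - 1) <<< a := by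
  unfold pvMask
  rw [Nat.shiftLeft_eq, Nat.sub_mul, one_mul, ← pow_add]
  congr 2
  omega

theorem pvMask_testBit (a b k : ℕ) (h : a ≤ b) :
    (pvMask a b).testBit k = decide (a ≤ k ∧ k ≤ b) := by
  rw [pvMask_eq_shift a b (by omega), Nat.testBit_shiftLeft, Nat.testBit_two_pow_sub_one]
  by_cases h1 : a ≤ k <;> simp [h1] <;> omega

theorem pvMask_or (a1 b1 a2 b2 : ℕ) (h1 : a1 ≤ b1) (h2 : a2 ≤ b2)
    (c1 : a1 ≤ b2 + 1) (c2 : a2 ≤ b1 + 1) :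
    pvMask a1 b1 ||| pvMask a2 b2 = pvMask (min a1 a2) (max b1 b2) := by
  apply Nat.eq_of_testBit_eq
  intro k
  rw [Nat.testBit_or, pvMask_testBit _ _ _ h1, pvMask_testBit _ _ _ h2,
    pvMask_testBit _ _ _ (by omega)]
  rw [← Bool.decide_or, decide_eq_decide]
  omega

theorem pvMask_shift (a b : ℕ) : (pvMask a b) <<< 1 = pvMask (a + 1) (b + 1) := by
  unfold pvMask
  rw [Nat.shiftLeft_eq]
  have e1 := pow_succ 2 a
  have e2 := pow_succ 2 (b + 1)
  rw [pow_one]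
  omega

theorem pvStepA_mask (g : Int) (a b : ℕ) :
    pvStepA g ((pvMask a b : ℕ) : Int)
      = ((pvMask (a + (pvB g).toNat) (b + (pvB g).toNat) : ℕ) : Int) := by
  unfold pvStepA pvB
  by_cases hg : g = 0
  · simp [hg]
  · rw [if_pos hg, ← Int.natCast_shiftLeft, pvMask_shift]
    simp [hg]

theorem pvB_toNat (g : Int) : pvB g = (((pvB g).toNat : ℕ) : Int) := by
  unfold pvB; split <;> rfl

theorem pvB_toNat_le (g : Int) : (pvB g).toNat ≤ 1 := by
  unfold pvB; split <;> simp

theorem pvFinal (a b k : ℕ) (h : a ≤ b) :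
    (PySem.Int.band ((pvMask a b : ℕ) : Int) ((1 : Int) <<< k) ≠ 0) ↔ (a ≤ k ∧ k ≤ b) := by
  have e1 : ((1 : Int) <<< k) = (((1 <<< k : ℕ) : ℕ) : Int) := by
    rw [Int.natCast_shiftLeft]
    norm_num
  rw [e1, PySem.Int.band_natCast, Nat.one_shiftLeft, Nat.and_two_pow, pvMask_testBit a b k h]
  by_cases hk : a ≤ k ∧ k ≤ b <;> simp [hk]

-- core column induction: A's and B's inner loops stay related, and the new row is a chain
theorem pvRow_equiv (ivs : List (Int × Int)) : ∀ (ds gs : List Int) (dL : Int) (pL : Int × Int),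
    pvInv dL pL → List.Forall₂ pvInv ds ivs → List.IsChain pvRel ivs →
    (∀ o ∈ ivs.head?, pL.1 ≤ o.2 + 1 ∧ o.1 ≤ pL.2 + 1) →
    List.Forall₂ pvInv (pvRowA dL ds gs) (pvRowB pL ivs gs) ∧
      List.IsChain pvRel (pL :: pvRowB pL ivs gs) := by
  induction ivs with
  | nil =>
    intro ds gs dL pL hL hf hc hx
    cases hf
    exact ⟨by simp [pvRowA, pvRowB], by simp [pvRowB]⟩
  | cons o ivs' ih =>
    intro ds gs dL pL hL hf hc hx
    cases hf with
    | cons hdo hf' =>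
      rename_i d ds'
      cases gs with
      | nil => exact ⟨by simp [pvRowA, pvRowB], by simp [pvRowB]⟩
      | cons g gs' =>
        obtain ⟨a1, b1, hab1, hp1, hp2, hd1⟩ := hL
        obtain ⟨a2, b2, hab2, ho1, ho2, hd2⟩ := hdo
        have hx' := hx o rfl
        rw [hp1, hp2, ho1, ho2] at hx'
        obtain ⟨u, htle, htc, hut⟩ : ∃ u : ℕ, u ≤ 1 ∧ pvB g = (u : Int) ∧ (pvB g).toNat = u :=
          ⟨(pvB g).toNat, pvB_toNat_le g, pvB_toNat g, rfl⟩
        have hor : PySem.Int.bor d dL = ((pvMask (min a2 a1) (max b2 b1) : ℕ) : Int) := by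
          rw [hd1, hd2, PySem.Int.bor_natCast,
            pvMask_or a2 b2 a1 b1 hab2 hab1 (by omega) (by omega)]
        have hd' : pvStepA g (PySem.Int.bor d dL)
            = ((pvMask (min a2 a1 + u) (max b2 b1 + u) : ℕ) : Int) := by
          rw [hor, pvStepA_mask, hut]
        have hcur : (min o.1 pL.1 + pvB g, max o.2 pL.2 + pvB g)
            = (((min a2 a1 + u : ℕ) : Int), ((max b2 b1 + u : ℕ) : Int)) := by
          rw [ho1, ho2, hp1, hp2, htc]
          simp only [Prod.mk.injEq]
          constructor <;> (push_cast; omega)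
        have inv' : pvInv (pvStepA g (PySem.Int.bor d dL))
            (min o.1 pL.1 + pvB g, max o.2 pL.2 + pvB g) :=
          ⟨min a2 a1 + u, max b2 b1 + u, by omega, by rw [hcur], by rw [hcur], hd'⟩
        have hx2 : ∀ o' ∈ ivs'.head?,
            (min o.1 pL.1 + pvB g, max o.2 pL.2 + pvB g).1 ≤ o'.2 + 1 ∧
              o'.1 ≤ (min o.1 pL.1 + pvB g, max o.2 pL.2 + pvB g).2 + 1 := by
          intro o' ho'
          cases ivs' with
          | nil => simp at ho'
          | cons o'' ivs'' =>
            simp only [List.head?_cons, Option.mem_def, Option.some.injEq] at ho'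
            subst ho'
            obtain ⟨hr1, hr2⟩ := hc.rel_head
            rw [ho2] at hr1
            rw [ho1] at hr2
            constructor <;> simp only [ho1, ho2, hp1, hp2, htc] <;> push_cast <;> omega
        obtain ⟨ihf, ihc⟩ := ih ds' gs' _ _ inv' hf' hc.tail hx2
        constructor
        · simp only [pvRowA, pvRowB]
          exact List.Forall₂.cons inv' ihf
        · simp only [pvRowB]
          refine List.isChain_cons_cons.mpr ⟨?_, ihc⟩
          constructor <;> simp only [hp1, hp2, ho1, ho2, htc] <;> push_cast <;> omega

-- first row: A's dp over [1, 0, …, 0] matches B's running count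
theorem pvFirst_equiv (gs : List Int) : ∀ (c : ℕ),
    List.Forall₂ pvInv (pvRowA ((pvMask c c : ℕ) : Int) (List.replicate gs.length 0) gs)
      (pvFirstRow (c : Int) gs) ∧
    List.IsChain pvRel (((c : Int), (c : Int)) :: pvFirstRow (c : Int) gs) := by
  induction gs with
  | nil => intro c; exact ⟨by simp [pvRowA, pvFirstRow], by simp [pvFirstRow]⟩
  | cons g gs' ih =>
    intro c
    obtain ⟨u, htle, htc, hut⟩ : ∃ u : ℕ, u ≤ 1 ∧ pvB g = (u : Int) ∧ (pvB g).toNat = u :=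
      ⟨(pvB g).toNat, pvB_toNat_le g, pvB_toNat g, rfl⟩
    have hstep : pvStepA g (PySem.Int.bor 0 ((pvMask c c : ℕ) : Int))
        = ((pvMask (c + u) (c + u) : ℕ) : Int) := by
      rw [PySem.Int.bor_comm, PySem.Int.bor_zero, pvStepA_mask, hut]
    have hacc : (c : Int) + pvB g = ((c + u : ℕ) : Int) := by
      rw [htc]; push_cast; ring
    obtain ⟨ihf, ihc⟩ := ih (c + u)
    constructor
    · simp only [List.length_cons, List.replicate_succ, pvRowA, pvFirstRow]
      rw [hstep, hacc]
      exact List.Forall₂.cons ⟨c + u, c + u, le_refl _, rfl, rfl, rfl⟩ ihf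
    · simp only [pvFirstRow]
      rw [hacc]
      refine List.isChain_cons_cons.mpr ⟨?_, ihc⟩
      constructor <;> push_cast <;> omega

theorem pvRowA_length (dL : Int) (ds : List Int) : ∀ (gs : List Int),
    ∀ dL', (pvRowA dL' ds gs).length = min ds.length gs.length := by
  induction ds with
  | nil => intro gs dL'; simp [pvRowA]
  | cons d ds' ih =>
    intro gs dL'
    cases gs with
    | nil => simp [pvRowA]
    | cons g gs' => simp [pvRowA, ih gs']

-- the outer fold over the remaining rows preserves the relation, the chain and the width
theorem pvFold_equiv (rows : List (List Int)) : ∀ (dp : List Int) (iv : List (Int × Int)) (n : ℕ),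
    dp.length = n → List.Forall₂ pvInv dp iv → List.IsChain pvRel iv →
    (∀ row ∈ rows, n ≤ row.length) →
    List.Forall₂ pvInv (rows.foldl pvRowAFull dp) (rows.foldl pvRowBFull iv) ∧
      List.IsChain pvRel (rows.foldl pvRowBFull iv) ∧
      (rows.foldl pvRowAFull dp).length = n := by
  induction rows with
  | nil => intro dp iv n hlen hf hc hrows; exact ⟨hf, hc, hlen⟩
  | cons row rows' ih =>
    intro dp iv n hlen hf hc hrows
    cases hf with
    | nil =>
      simp only [List.foldl_cons]
      have e1 : pvRowAFull [] row = [] := by cases row <;> rfl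
      have e2 : pvRowBFull [] row = [] := by cases row <;> rfl
      rw [e1, e2]
      exact ih [] [] n hlen List.Forall₂.nil (by simp)
        (fun r hr => hrows r (List.mem_cons_of_mem _ hr))
    | cons hdo hf' =>
      rename_i d o ds ivs
      have hrowlen : n ≤ row.length := hrows row List.mem_cons_self
      cases row with
      | nil =>
        exfalso
        simp at hlen hrowlen
        omega
      | cons g gs =>
        obtain ⟨a, b, hab, ho1, ho2, hd⟩ := hdo
        obtain ⟨u, htle, htc, hut⟩ : ∃ u : ℕ, u ≤ 1 ∧ pvB g = (u : Int) ∧ (pvB g).toNat = u :=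
          ⟨(pvB g).toNat, pvB_toNat_le g, pvB_toNat g, rfl⟩
        have hstep : pvStepA g d = ((pvMask (a + u) (b + u) : ℕ) : Int) := by
          rw [hd, pvStepA_mask, hut]
        have hcur : (o.1 + pvB g, o.2 + pvB g)
            = (((a + u : ℕ) : Int), ((b + u : ℕ) : Int)) := by
          rw [ho1, ho2, htc]
          simp only [Prod.mk.injEq]
          constructor <;> (push_cast; ring)
        have inv0 : pvInv (pvStepA g d) (o.1 + pvB g, o.2 + pvB g) :=
          ⟨a + u, b + u, by omega, by rw [hcur], by rw [hcur], hstep⟩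
        have hx0 : ∀ o' ∈ ivs.head?,
            (o.1 + pvB g, o.2 + pvB g).1 ≤ o'.2 + 1 ∧
              o'.1 ≤ (o.1 + pvB g, o.2 + pvB g).2 + 1 := by
          intro o' ho'
          cases ivs with
          | nil => simp at ho'
          | cons o'' ivs'' =>
            simp only [List.head?_cons, Option.mem_def, Option.some.injEq] at ho'
            subst ho'
            obtain ⟨hr1, hr2⟩ := hc.rel_head
            rw [ho2] at hr1
            rw [ho1] at hr2
            constructor <;> simp only [ho1, ho2, htc] <;> push_cast <;> omega
        obtain ⟨hf2, hch2⟩ := pvRow_equiv ivs ds gs (pvStepA g d) (o.1 + pvB g, o.2 + pvB g)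
          inv0 hf' hc.tail hx0
        have eA : pvRowAFull (d :: ds) (g :: gs) = pvStepA g d :: pvRowA (pvStepA g d) ds gs := rfl
        have eB : pvRowBFull (o :: ivs) (g :: gs)
            = (o.1 + pvB g, o.2 + pvB g) :: pvRowB (o.1 + pvB g, o.2 + pvB g) ivs gs := rfl
        simp only [List.foldl_cons, eA, eB]
        apply ih
        · have hlen' : ds.length + 1 = n := by simpa using hlen
          have hrowlen' : n ≤ gs.length + 1 := by simpa using hrowlen
          simp [pvRowA_length (pvStepA g d) ds gs (pvStepA g d)]
          omega
        · exact List.Forall₂.cons inv0 hf2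
        · exact hch2
        · exact fun r hr => hrows r (List.mem_cons_of_mem _ hr)

theorem pvForall₂_getLast :
    ∀ (xs : List Int) (ys : List (Int × Int)), List.Forall₂ pvInv xs ys → xs ≠ [] →
      ∃ x y, xs.getLast? = some x ∧ ys.getLast? = some y ∧ pvInv x y := by
  intro xs
  induction xs with
  | nil => intro ys hf hne; exact absurd rfl hne
  | cons x xs' ih =>
    intro ys hf hne
    cases hf with
    | cons hxy hf' =>
      rename_i y ys'
      cases xs' with
      | nil => cases hf'; exact ⟨x, y, rfl, rfl, hxy⟩
      | cons x2 xs'' =>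
        obtain ⟨x', y', hx', hy', hinv⟩ := ih _ hf' (by simp)
        cases hf' with
        | cons h2 hf'' =>
          rename_i y2 ys''
          exact ⟨x', y', by simpa using hx', by simpa using hy', hinv⟩

-- ===== VERDICT (by name: the statement is the Claim_ definition above) =====
theorem isThereAPath_spec : Claim_equal_isThereAPath := by
  unfold Claim_equal_isThereAPath Spec_isThereAPath
  intro grid _hdom hpre
  obtain ⟨hne, hcase⟩ := hpre
  cases grid with
  | nil => exact absurd rfl hne
  | cons r0 rest =>
    simp only [List.headD_cons] at hcase
    by_cases hodd : ((r0 :: rest).length + r0.length - 1) % 2 = 1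
    · -- odd path length: both return false immediately
      rw [isThereAPath, isThereAPath_alt]
      simp only [List.headD_cons]
      rw [if_pos (by rw [Nat.and_one_is_mod]; omega), if_pos hodd]
    · obtain ⟨hn, hrows⟩ := hcase.resolve_left hodd
      cases r0 with
      | nil => simp at hn
      | cons g0 gs0 =>
        obtain ⟨u, htle, htc, hut⟩ : ∃ u : ℕ, u ≤ 1 ∧ pvB g0 = (u : Int) ∧ (pvB g0).toNat = u :=
          ⟨(pvB g0).toNat, pvB_toNat_le g0, pvB_toNat g0, rfl⟩
        have h1 : (1 : Int) = ((pvMask 0 0 : ℕ) : Int) := by norm_num [pvMask]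
        have hstep0 : pvStepA g0 1 = ((pvMask u u : ℕ) : Int) := by
          rw [h1, pvStepA_mask, hut]
          norm_num
        have hacc0 : (0 : Int) + pvB g0 = ((u : ℕ) : Int) := by rw [htc, zero_add]
        have efirstB : pvFirstRow 0 (g0 :: gs0)
            = ((u : Int), (u : Int)) :: pvFirstRow (u : Int) gs0 := by
          rw [pvFirstRow]
          rw [show ((0 : Int) + pvB g0) = ((u : ℕ) : Int) from hacc0]
        have efirstA : pvRowAFull (1 :: List.replicate ((g0 :: gs0).length - 1) 0) (g0 :: gs0)
            = pvStepA g0 1 :: pvRowA (pvStepA g0 1) (List.replicate gs0.length 0) gs0 := by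
          simp [pvRowAFull]
        obtain ⟨hf1, hc1⟩ := pvFirst_equiv gs0 u
        have hf1' : List.Forall₂ pvInv
            (pvRowAFull (1 :: List.replicate ((g0 :: gs0).length - 1) 0) (g0 :: gs0))
            (pvFirstRow 0 (g0 :: gs0)) := by
          rw [efirstA, efirstB, hstep0]
          exact List.Forall₂.cons ⟨u, u, le_refl _, rfl, rfl, rfl⟩ hf1
        have hc1' : List.IsChain pvRel (pvFirstRow 0 (g0 :: gs0)) := by
          rw [efirstB]; exact hc1
        have hl1 : (pvRowAFull (1 :: List.replicate ((g0 :: gs0).length - 1) 0) (g0 :: gs0)).length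
            = (g0 :: gs0).length := by
          rw [efirstA]
          simp [pvRowA_length (pvStepA g0 1) (List.replicate gs0.length 0) gs0 (pvStepA g0 1)]
        obtain ⟨hfF, hcF, hlF⟩ := pvFold_equiv rest _ _ ((g0 :: gs0).length) hl1 hf1' hc1'
          (fun r hr => hrows r (List.mem_cons_of_mem _ hr))
        obtain ⟨x, y, hx, hy, a, b, hab, hy1, hy2, hxv⟩ := pvForall₂_getLast _ _ hfF
          (by intro h; rw [h] at hlF; simp at hlF)
        rw [isThereAPath, isThereAPath_alt]
        simp only [List.headD_cons, List.drop_one, List.foldl_cons, List.tail_cons]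
        rw [if_neg (by rw [Nat.and_one_is_mod]; omega), if_neg hodd]
        cases y with
        | mk ylo yhi =>
          simp only at hy1 hy2
          subst hy1
          subst hy2
          have hsh : (((g0 :: gs0) :: rest).length + (g0 :: gs0).length - 1) >>> 1
              = (((g0 :: gs0) :: rest).length + (g0 :: gs0).length - 1) / 2 := by
            rw [Nat.shiftRight_eq_div_pow, pow_one]
          simp only [hx, hy, Option.getD_some, hxv, hsh]
          rw [decide_eq_decide]
          rw [pvFinal a b _ hab]
          omega
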